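-- pv_equiv track=rewrite | github.com/lurenxing628/---- | web/bootstrap/plugins.py | _config_source_summary
-- ===== SOURCE A (Python) =====
-- from typing import Any, Dict, List, Optional
--
-- def _config_source_summary(sources: List[str], default_source: str) -> str:
--     source_set = {str(source or "").strip() for source in sources if str(source or "").strip()}
--     has_config = "config" in source_set
--     non_config_sources = {source for source in source_set if source != "config"}
--     if has_config and non_config_sources:
--         return "mixed"
--     if has_config:
--         return "config"
--     if len(non_config_sources) == 1:
--         return next(iter(non_config_sources))
--     if len(non_config_sources) > 1:
--         return "mixed"
--     return str(default_source or "default")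
-- ===== SOURCE B (Python) =====
-- def _config_source_summary(sources, default_source):
--     # Single forward pass, no sets: remember the first cleaned source seen and
--     # bail out with "mixed" the moment a different cleaned source appears.
--     seen = None
--     for s in sources:
--         c = str(s or "").strip()
--         if not c:
--             continue
--         if seen is None:
--             seen = c
--         elif c != seen:
--             return "mixed"
--     return seen if seen is not None else str(default_source or "default")
-- ===== Notes on version B (the rewrite author's own statement) =====
-- stated objective: alternative
-- what changed: B replaces A's two-set construction and five-branch classification by a single forward pass that keeps only the first cleaned source in an Option accumulator and returns 'mixed' immediately on the first differing cleaned source; no set is ever built and the 'config' special-casing disappears.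
import Mathlib
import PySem

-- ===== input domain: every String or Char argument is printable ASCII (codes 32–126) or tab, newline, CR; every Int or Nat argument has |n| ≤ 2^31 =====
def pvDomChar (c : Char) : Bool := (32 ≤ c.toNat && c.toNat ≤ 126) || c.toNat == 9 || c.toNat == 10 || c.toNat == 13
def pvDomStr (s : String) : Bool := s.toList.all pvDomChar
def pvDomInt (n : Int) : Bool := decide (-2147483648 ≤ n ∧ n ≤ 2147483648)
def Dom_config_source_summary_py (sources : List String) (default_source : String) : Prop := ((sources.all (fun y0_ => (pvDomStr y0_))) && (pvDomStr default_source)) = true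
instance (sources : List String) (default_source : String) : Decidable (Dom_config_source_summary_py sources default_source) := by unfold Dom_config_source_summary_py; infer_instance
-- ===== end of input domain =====

-- B replaces A's two-set/five-branch classification by one forward pass with an Option
-- accumulator and an early "mixed" exit (alternative decomposition; same exact behaviour).


-- ===== PORT A =====
-- str(s or "") on a str is s itself, so cleaning = strip; empty results are filtered out
def pvClean (s : String) : Option String :=
  let c := PySem.Str.strip s
  if c = "" then none else some c

-- {str(source or "").strip() for source in sources if str(source or "").strip()}
def pvCleanSet (sources : List String) : PySem.Set String :=
  PySem.Set.ofList (sources.filterMap pvClean)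

def config_source_summary_py (sources : List String) (default_source : String) : String :=
  let source_set : PySem.Set String := pvCleanSet sources
  let has_config : Bool := PySem.Set.contains source_set "config"
  let non_config_sources : PySem.Set String := source_set.filter (fun s => s ≠ "config")
  if has_config && !non_config_sources.isEmpty then "mixed"
  else if has_config then "config"
  else if non_config_sources.length = 1 then non_config_sources.headD ""  -- next(iter(·)) on a singleton set
  else if non_config_sources.length > 1 then "mixed"
  else if default_source = "" then "default" else default_source

-- ===== PORT B =====
-- the for-loop of Source B: 'seen' accumulator, early return "mixed" on a differing cleaned source
def pvAltLoop (default_source : String) : List String → Option String → String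
  | [], seen =>
      match seen with
      | some v => v
      | none => if default_source = "" then "default" else default_source
  | s :: rest, seen =>
      let c := PySem.Str.strip s
      if c = "" then pvAltLoop default_source rest seen
      else
        match seen with
        | none => pvAltLoop default_source rest (some c)
        | some v => if c ≠ v then "mixed" else pvAltLoop default_source rest (some v)

def config_source_summary_py_alt (sources : List String) (default_source : String) : String :=
  pvAltLoop default_source sources none

-- ===== PRECONDITION & SPEC =====
def Spec_config_source_summary_py (sources : List String) (default_source : String) (out : String) : Prop := out = config_source_summary_py_alt sources default_source
instance (sources : List String) (default_source : String) (out : String) : Decidable (Spec_config_source_summary_py sources default_source out) := by unfold Spec_config_source_summary_py; infer_instance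

-- ===== CLAIM =====
def Claim_equal_config_source_summary_py : Prop := ∀ (sources : List String) (default_source : String), Dom_config_source_summary_py sources default_source → Spec_config_source_summary_py sources default_source (config_source_summary_py sources default_source)

-- ===== LEMMAS AND PROOFS =====

-- A's five branches over the two sets, rewritten as a cardinality test over the one set L
theorem pv_core (L : List String) (d : String) (hnd : L.Nodup) :
    (if PySem.Set.contains L "config" && !(L.filter (fun s => s ≠ "config")).isEmpty then "mixed"
     else if PySem.Set.contains L "config" then "config"
     else if (L.filter (fun s => s ≠ "config")).length = 1 then (L.filter (fun s => s ≠ "config")).headD ""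
     else if (L.filter (fun s => s ≠ "config")).length > 1 then "mixed"
     else if d = "" then "default" else d)
    = (if L.length = 1 then L.headD ""
       else if !L.isEmpty then "mixed"
       else if d = "" then "default" else d) := by
  match L, hnd with
  | [], _ => simp [PySem.Set.contains]
  | [x], _ =>
    by_cases hx : x = "config"
    · subst hx; simp [PySem.Set.contains]
    · have hx' : ¬ ("config" = x) := fun h => hx h.symm
      simp [PySem.Set.contains, hx, hx']
  | x :: y :: rest, hnd =>
    have hxy : x ≠ y := fun h =>
      (List.nodup_cons.mp hnd).1 (by rw [h]; exact List.mem_cons_self ..)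
    by_cases hc : "config" ∈ x :: y :: rest
    · have hcb : PySem.Set.contains (x :: y :: rest) "config" = true := by
        simpa [PySem.Set.contains] using hc
      have hne : ((x :: y :: rest).filter (fun s => s ≠ "config")) ≠ [] := by
        by_cases hxx : x = "config"
        · have hy : y ≠ "config" := fun h => hxy (hxx.trans h.symm)
          simp [List.filter, hxx, hy]
        · simp [List.filter, hxx]
      have hie : ((x :: y :: rest).filter (fun s => s ≠ "config")).isEmpty = false := by
        rw [List.isEmpty_eq_false_iff]; exact hne
      rw [hcb, hie]; simp
    · have hcb : PySem.Set.contains (x :: y :: rest) "config" = false := by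
        simpa [PySem.Set.contains] using hc
      have hfix : (x :: y :: rest).filter (fun s => s ≠ "config") = x :: y :: rest := by
        rw [List.filter_eq_self]
        intro a ha
        simp only [ne_eq, decide_eq_true_eq]
        exact fun h => hc (h ▸ ha)
      rw [hcb, hfix]; simp

-- foldl Set.add only appends: the initial list is a prefix of the result
theorem pv_foldl_add_prefix (ms : List String) (s : List String) :
    ∃ t, List.foldl PySem.Set.add s ms = s ++ t := by
  induction ms generalizing s with
  | nil => exact ⟨[], by simp⟩
  | cons x r ih =>
    simp only [List.foldl_cons]
    by_cases h : x ∈ s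
    · have : PySem.Set.add s x = s := by simp [PySem.Set.add, PySem.Set.contains, h]
      rw [this]; exact ih s
    · have : PySem.Set.add s x = s ++ [x] := by simp [PySem.Set.add, PySem.Set.contains, h]
      rw [this]
      obtain ⟨t, ht⟩ := ih (s ++ [x])
      exact ⟨[x] ++ t, by simp [ht]⟩

theorem pv_foldl_add_all_eq (m : String) (ms : List String)
    (h : ∀ x ∈ ms, x = m) : List.foldl PySem.Set.add [m] ms = [m] := by
  induction ms with
  | nil => rfl
  | cons x r ih =>
    have hx : x = m := h x (List.mem_cons_self ..)
    subst hx
    have : PySem.Set.add [x] x = [x] := by simp [PySem.Set.add, PySem.Set.contains]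
    simp only [List.foldl_cons, this]
    exact ih (fun y hy => h y (List.mem_cons_of_mem _ hy))

theorem pv_foldl_add_ne (m : String) (ms : List String)
    (h : ∃ x ∈ ms, x ≠ m) : 2 ≤ (List.foldl PySem.Set.add [m] ms).length := by
  induction ms with
  | nil => obtain ⟨x, hx, _⟩ := h; cases hx
  | cons x r ih =>
    simp only [List.foldl_cons]
    by_cases hx : x = m
    · subst hx
      have : PySem.Set.add [x] x = [x] := by simp [PySem.Set.add, PySem.Set.contains]
      rw [this]
      obtain ⟨y, hy, hym⟩ := h
      rcases List.mem_cons.mp hy with h1 | h2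
      · exact absurd h1 hym
      · exact ih ⟨y, h2, hym⟩
    · have hadd : PySem.Set.add [m] x = [m, x] := by
        simp [PySem.Set.add, PySem.Set.contains, hx]
      rw [hadd]
      obtain ⟨t, ht⟩ := pv_foldl_add_prefix r [m, x]
      rw [ht]; simp

-- B's loop with 'seen = some v': v if every remaining cleaned source equals v, else "mixed"
theorem pv_loop_some (d : String) (l : List String) (v : String) :
    pvAltLoop d l (some v)
      = if (l.filterMap pvClean).all (· == v) then v else "mixed" := by
  induction l with
  | nil => simp [pvAltLoop]
  | cons s rest ih =>
    by_cases hc : PySem.Str.strip s = ""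
    · simp [pvAltLoop, pvClean, hc, ih]
    · by_cases hv : PySem.Str.strip s = v
      · subst hv
        simp [pvAltLoop, pvClean, hc, ih]
      · simp [pvAltLoop, pvClean, hc, hv]

-- B's loop from the start, described by the cleaned list
theorem pv_loop_none (d : String) (l : List String) :
    pvAltLoop d l none
      = match l.filterMap pvClean with
        | [] => if d = "" then "default" else d
        | m :: ms => if ms.all (· == m) then m else "mixed" := by
  induction l with
  | nil => simp [pvAltLoop]
  | cons s rest ih =>
    by_cases hc : PySem.Str.strip s = ""
    · simp [pvAltLoop, pvClean, hc, ih]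
    · simp [pvAltLoop, pvClean, hc, pv_loop_some]

-- the cardinality form over set(M) equals B's single-pass form over M
theorem pv_card_eq_loop (M : List String) (d : String) :
    (if (PySem.Set.ofList M).length = 1 then (PySem.Set.ofList M).headD ""
     else if !(PySem.Set.ofList M).isEmpty then "mixed"
     else if d = "" then "default" else d)
    = match M with
      | [] => if d = "" then "default" else d
      | m :: ms => if ms.all (· == m) then m else "mixed" := by
  cases M with
  | nil => simp [PySem.Set.ofList]
  | cons m ms =>
    have hof : PySem.Set.ofList (m :: ms) = List.foldl PySem.Set.add [m] ms := by
      simp [PySem.Set.ofList, PySem.Set.add, PySem.Set.contains]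
    by_cases hall : ms.all (· == m) = true
    · have h1 : ∀ x ∈ ms, x = m := by
        intro x hx
        have := List.all_eq_true.mp hall x hx
        simpa using this
      rw [hof, pv_foldl_add_all_eq m ms h1]
      simp [hall]
    · have h2 : ∃ x ∈ ms, x ≠ m := by
        rcases List.all_eq_true.not.mp hall with h
        push Not at h
        obtain ⟨x, hx, hne⟩ := h
        exact ⟨x, hx, by simpa using hne⟩
      have hlen := pv_foldl_add_ne m ms h2
      rw [hof]
      have hl1 : ¬ (List.foldl PySem.Set.add [m] ms).length = 1 := by omega
      have hne : (List.foldl PySem.Set.add [m] ms).isEmpty = false := by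
        rw [List.isEmpty_eq_false_iff]
        intro h; rw [h] at hlen; simp at hlen
      simp [hl1, hne, hall]

-- ===== VERDICT =====
theorem config_source_summary_py_spec : Claim_equal_config_source_summary_py := by
  intro sources default_source _
  unfold Spec_config_source_summary_py config_source_summary_py config_source_summary_py_alt pvCleanSet
  rw [pv_core _ default_source (PySem.Set.nodup_ofList _), pv_loop_none,
    pv_card_eq_loop]
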